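-- pv_equiv track=rewrite | github.com/yvonneyeh/leetcode | 1773.py | countMatches_1stTry
-- ===== SOURCE A (Python) =====
-- from typing import List
--
-- def countMatches_1stTry(items: List[List[str]], ruleKey: str, ruleValue: str) -> int:
--
--     matching = 0
--     for item in items:
--         if ruleKey == 'type':
--             if ruleValue == item[0]:
--                 matching += 1
--         if ruleKey == 'color':
--             if ruleValue == item[1]:
--                 matching += 1
--         if ruleKey == 'name':
--             if ruleValue == item[2]:
--                 matching += 1
--
--     return matching
-- ===== SOURCE B (Python) =====
-- def countMatches_1stTry(items, ruleKey, ruleValue):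
--     # Pre-aggregate: count every (column, value) occurrence once, then answer
--     # with a single table lookup keyed by the rule.
--     counts = {}
--     for item in items:
--         for i, v in enumerate(item[:3]):
--             counts[(i, v)] = counts.get((i, v), 0) + 1
--     idx = {'type': 0, 'color': 1, 'name': 2}.get(ruleKey, -1)
--     return counts.get((idx, ruleValue), 0)
-- ===== Notes on version B (the rewrite author's own statement) =====
-- stated objective: alternative
-- what changed: B replaces A's per-item rule-key branching with a two-stage pipeline: it first builds a frequency table of every (column, value) pair over all items, then answers the rule with a single table lookup keyed by the resolved column index (unknown keys resolve to -1, which matches nothing).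
import Mathlib
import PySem

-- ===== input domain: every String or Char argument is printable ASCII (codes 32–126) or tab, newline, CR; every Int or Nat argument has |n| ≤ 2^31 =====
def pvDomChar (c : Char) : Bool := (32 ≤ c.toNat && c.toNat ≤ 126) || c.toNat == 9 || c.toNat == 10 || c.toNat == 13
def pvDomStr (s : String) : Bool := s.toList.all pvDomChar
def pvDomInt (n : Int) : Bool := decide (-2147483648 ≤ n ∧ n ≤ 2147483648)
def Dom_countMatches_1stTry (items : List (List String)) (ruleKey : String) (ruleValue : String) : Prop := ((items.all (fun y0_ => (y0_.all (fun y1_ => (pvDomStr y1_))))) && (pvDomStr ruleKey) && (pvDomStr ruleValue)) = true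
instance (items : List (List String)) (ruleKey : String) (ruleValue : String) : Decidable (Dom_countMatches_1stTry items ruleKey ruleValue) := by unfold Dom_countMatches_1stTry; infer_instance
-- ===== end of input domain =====

-- B pre-aggregates all (column, value) occurrence counts into one table in a first stage,
-- then answers the rule with a single table lookup; objective: alternative (same O(n) cost, different data flow).


-- ===== PORT A =====
-- item[k] is ported as PySem.List.pyGetD item k ""; Pre_ guarantees the index is in range wherever it is evaluated.
def countMatches_1stTry (items : List (List String)) (ruleKey : String) (ruleValue : String) : Int :=
  items.foldl (fun matching item =>
    let matching := if ruleKey = "type" then (if ruleValue = PySem.List.pyGetD item 0 "" then matching + 1 else matching) else matching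
    let matching := if ruleKey = "color" then (if ruleValue = PySem.List.pyGetD item 1 "" then matching + 1 else matching) else matching
    let matching := if ruleKey = "name" then (if ruleValue = PySem.List.pyGetD item 2 "" then matching + 1 else matching) else matching
    matching) 0

-- ===== PORT B =====
-- stage 1: counts[(i, v)] += 1 for every (i, v) in enumerate(item[:3]), over all items;
-- stage 2: idx = {'type':0,'color':1,'name':2}.get(ruleKey, -1); return counts.get((idx, ruleValue), 0)
def countMatches_1stTry_alt (items : List (List String)) (ruleKey : String) (ruleValue : String) : Int :=
  let counts := items.foldl (fun counts item =>
    (PySem.List.enumerate (PySem.List.slice item none (some 3))).foldl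
      (fun counts p => counts.insert p (counts.getD p 0 + 1)) counts)
    (PySem.Dict.mk [])
  let idx := (PySem.Dict.mk [("type", (0 : Int)), ("color", 1), ("name", 2)]).getD ruleKey (-1)
  counts.getD (idx, ruleValue) 0

-- ===== PRECONDITION & SPEC =====
-- Pre_ excludes exactly the inputs on which Python A raises IndexError: a recognised ruleKey with
-- some item shorter than the required column (B returns a value there, see Raises_ below).
def Pre_countMatches_1stTry (items : List (List String)) (ruleKey : String) (ruleValue : String) : Prop :=
  (ruleKey = "type" → ∀ it ∈ items, 1 ≤ it.length) ∧
  (ruleKey = "color" → ∀ it ∈ items, 2 ≤ it.length) ∧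
  (ruleKey = "name" → ∀ it ∈ items, 3 ≤ it.length)
instance (items : List (List String)) (ruleKey : String) (ruleValue : String) : Decidable (Pre_countMatches_1stTry items ruleKey ruleValue) := by unfold Pre_countMatches_1stTry; infer_instance
def pvWitness_countMatches_1stTry : List (List String) × String × String := ([["phone", "blue", "pixel"], ["computer", "silver", "lenovo"]], "color", "silver")
def Spec_countMatches_1stTry (items : List (List String)) (ruleKey : String) (ruleValue : String) (out : Int) : Prop := out = countMatches_1stTry_alt items ruleKey ruleValue
instance (items : List (List String)) (ruleKey : String) (ruleValue : String) (out : Int) : Decidable (Spec_countMatches_1stTry items ruleKey ruleValue out) := by unfold Spec_countMatches_1stTry; infer_instance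

-- ===== CLAIM (what is proved, stated in full; the proofs are below) =====
def Claim_equal_countMatches_1stTry : Prop := ∀ (items : List (List String)) (ruleKey : String) (ruleValue : String), Dom_countMatches_1stTry items ruleKey ruleValue → Pre_countMatches_1stTry items ruleKey ruleValue → Spec_countMatches_1stTry items ruleKey ruleValue (countMatches_1stTry items ruleKey ruleValue)

-- ===== LEMMAS AND PROOFS =====
-- Occurrence count of (i, v) in enumerate(l, s): 1 exactly when position i - s holds v.
theorem pv_count_enum {α : Type} [DecidableEq α] (v : α) : ∀ (l : List α) (s i : Int),
    (PySem.List.enumerate l s).count (i, v) =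
      if s ≤ i ∧ l[(i - s).toNat]? = some v then 1 else 0
  | [], s, i => by simp [PySem.List.enumerate]
  | a :: l, s, i => by
    rw [PySem.List.enumerate_cons, List.count_cons, pv_count_enum v l (s + 1) i]
    by_cases h : i = s
    · subst h
      have hs : ¬ (i + 1 ≤ i) := by omega
      have h0 : (i - i).toNat = 0 := by omega
      simp only [hs, false_and, if_false, zero_add, h0, List.getElem?_cons_zero, le_refl,
        true_and, Option.some.injEq, beq_iff_eq, Prod.mk.injEq]
    · have hne : ((s, a) == (i, v)) = false := by
        simp only [beq_eq_false_iff_ne, ne_eq, Prod.mk.injEq, not_and]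
        intro hh
        exact absurd hh.symm h
      rw [hne]
      by_cases hle : s ≤ i
      · have h1 : s + 1 ≤ i := by omega
        have h2 : (i - s).toNat = (i - (s + 1)).toNat + 1 := by omega
        simp [h1, hle, h2]
      · have h1 : ¬ (s + 1 ≤ i) := by omega
        simp [h1, hle]

-- The value of one counting-table entry after B's nested building loop: old value plus
-- total occurrences of that key over the items' enumerated first-three columns.
theorem pv_nested_getD (q : Int × String) : ∀ (items : List (List String)) (d : PySem.Dict (Int × String) Int),
    (items.foldl (fun counts item =>
        (PySem.List.enumerate (PySem.List.slice item none (some 3))).foldl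
          (fun counts p => counts.insert p (counts.getD p 0 + 1)) counts) d).getD q 0
      = d.getD q 0 + ((items.map (fun item =>
          (((PySem.List.enumerate (PySem.List.slice item none (some 3))).count q : Int)))).sum)
  | [], d => by simp
  | it :: items, d => by
    rw [List.foldl_cons, pv_nested_getD q items]
    have hin : (List.foldl (fun counts p => counts.insert p (counts.getD p 0 + 1)) d
          (PySem.List.enumerate (PySem.List.slice it none (some 3)))).getD q 0
        = d.getD q 0 + (((PySem.List.enumerate (PySem.List.slice it none (some 3))).count q : Int)) :=
      PySem.Dict.getD_foldl_modify_add_one _ d q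
    rw [hin]
    simp; ring

-- For a recognised column i < 3 in range of item, the per-item occurrence count is A's indicator.
theorem pv_item_count (item : List String) (v : String) (i : Nat) (hi : i < 3) (hlen : i < item.length) :
    ((PySem.List.enumerate (PySem.List.slice item none (some 3))).count ((i : Int), v) : Int)
      = if v = PySem.List.pyGetD item (i : Int) "" then 1 else 0 := by
  rw [PySem.List.slice_to item (by omega : (0:Int) ≤ 3), pv_count_enum]
  have h0 : ((i : Int) - 0).toNat = i := by omega
  have hget : (item.take (3:Int).toNat)[i]? = some item[i] := by
    rw [List.getElem?_take_of_lt (by omega)]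
    exact List.getElem?_eq_getElem hlen
  rw [PySem.List.pyGetD_eq_getElem item "" (by omega) (by exact_mod_cast hlen)]
  have hnn : (0:Int) ≤ (i:Int) := Int.natCast_nonneg i
  simp only [h0, hget, hnn, true_and, Option.some.injEq, Int.toNat_natCast]
  by_cases hv : item[i] = v
  · rw [if_pos hv, if_pos hv.symm]
    simp
  · rw [if_neg hv, if_neg (fun hh => hv hh.symm)]
    simp

-- One recognised key: A's counting loop equals B's table entry at column i.
theorem pv_key_case (items : List (List String)) (v : String) (i : Nat) (hi : i < 3)
    (hlen : ∀ it ∈ items, i < it.length) :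
    items.foldl (fun m it => if v = PySem.List.pyGetD it (i : Int) "" then m + 1 else m) 0
      = (0 : Int) + ((items.map (fun item =>
          (((PySem.List.enumerate (PySem.List.slice item none (some 3))).count ((i : Int), v) : Int)))).sum) := by
  have hmap : items.map (fun item =>
        (((PySem.List.enumerate (PySem.List.slice item none (some 3))).count ((i : Int), v) : Int)))
      = items.map (fun it => if (v = PySem.List.pyGetD it (i : Int) "") then 1 else 0) := by
    apply List.map_congr_left
    intro it hit
    exact pv_item_count it v i hi (hlen it hit)
  rw [hmap]
  have := PySem.List.foldl_count_if (fun it => decide (v = PySem.List.pyGetD it (i : Int) "")) items 0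
  simp only [decide_eq_true_eq] at this
  rw [this]
  have := PySem.List.sum_map_ite_one_zero (fun it => decide (v = PySem.List.pyGetD it (i : Int) "")) items
  simp only [decide_eq_true_eq] at this
  rw [this]

-- B's initial table is empty: every entry reads 0.
theorem pv_empty_getD (q : Int × String) : (PySem.Dict.mk ([] : List ((Int × String) × Int))).getD q 0 = 0 := rfl

theorem countMatches_1stTry_spec : Claim_equal_countMatches_1stTry := by
  intro items ruleKey ruleValue _ hpre
  obtain ⟨p1, p2, p3⟩ := hpre
  unfold Spec_countMatches_1stTry countMatches_1stTry countMatches_1stTry_alt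
  rw [pv_nested_getD, pv_empty_getD]
  by_cases h1 : ruleKey = "type"
  · subst h1
    have hidx : (PySem.Dict.mk [("type", (0 : Int)), ("color", 1), ("name", 2)]).getD "type" (-1) = 0 := by decide
    rw [hidx]
    simp only [if_neg (by decide : ("type" : String) ≠ "color"),
      if_neg (by decide : ("type" : String) ≠ "name")]
    have := pv_key_case items ruleValue 0 (by omega) (fun it hit => by have := p1 rfl it hit; omega)
    simp only [zero_add] at this ⊢
    simpa using this
  · by_cases h2 : ruleKey = "color"
    · subst h2
      have hidx : (PySem.Dict.mk [("type", (0 : Int)), ("color", 1), ("name", 2)]).getD "color" (-1) = 1 := by decide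
      rw [hidx]
      simp only [if_neg (by decide : ("color" : String) ≠ "type"),
        if_neg (by decide : ("color" : String) ≠ "name")]
      have := pv_key_case items ruleValue 1 (by omega) (fun it hit => by have := p2 rfl it hit; omega)
      simp only [zero_add] at this ⊢
      simpa using this
    · by_cases h3 : ruleKey = "name"
      · subst h3
        have hidx : (PySem.Dict.mk [("type", (0 : Int)), ("color", 1), ("name", 2)]).getD "name" (-1) = 2 := by decide
        rw [hidx]
        simp only [if_neg (by decide : ("name" : String) ≠ "type"),
          if_neg (by decide : ("name" : String) ≠ "color")]
        have := pv_key_case items ruleValue 2 (by omega) (fun it hit => by have := p3 rfl it hit; omega)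
        simp only [zero_add] at this ⊢
        simpa using this
      · have hs1 : ("type" == ruleKey) = false := by simp; exact fun h => h1 h.symm
        have hs2 : ("color" == ruleKey) = false := by simp; exact fun h => h2 h.symm
        have hs3 : ("name" == ruleKey) = false := by simp; exact fun h => h3 h.symm
        have hidx : (PySem.Dict.mk [("type", (0 : Int)), ("color", 1), ("name", 2)]).getD ruleKey (-1) = -1 := by
          simp [PySem.Dict.getD, PySem.Dict.get?, List.find?, hs1, hs2, hs3]
        rw [hidx]
        have hz : ∀ item : List String,
            (((PySem.List.enumerate (PySem.List.slice item none (some 3))).count ((-1 : Int), ruleValue) : Int)) = 0 := by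
          intro item
          rw [pv_count_enum]
          simp
        simp only [if_neg h1, if_neg h2, if_neg h3]
        rw [List.map_congr_left (fun it _ => hz it)]
        simp [List.foldl_fixed]
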